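-- pv_equiv track=rewrite | github.com/Abhishek-S-2001/Code-with-me | Codeforces/1560A - Dislike of Threes.py | generate_polycarp_sequence
-- ===== SOURCE A (Python) =====
-- def generate_polycarp_sequence(limit=1000):
--     sequence = []
--     num = 1
--     while len(sequence) < limit:
--         if num % 3 != 0 and num % 10 != 3:
--             sequence.append(num)
--         num += 1
--     return sequence
-- ===== SOURCE B (Python) =====
-- OFFS = [1, 2, 4, 5, 7, 8, 10, 11, 14, 16, 17, 19, 20, 22, 25, 26, 28, 29]
--
-- def generate_polycarp_sequence(limit=1000):
--     return [30 * (i // 18) + OFFS[i % 18] for i in range(limit)]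
-- ===== Notes on version B (the rewrite author's own statement) =====
-- stated objective: faster
-- what changed: Replaced the scan-and-test while loop over all integers with a closed-form index-to-value map: the predicate is periodic with period 30 and 18 hits per block, so element i is 30*(i//18) + OFFS[i%18] over a precomputed 18-entry offset table.
import Mathlib
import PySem

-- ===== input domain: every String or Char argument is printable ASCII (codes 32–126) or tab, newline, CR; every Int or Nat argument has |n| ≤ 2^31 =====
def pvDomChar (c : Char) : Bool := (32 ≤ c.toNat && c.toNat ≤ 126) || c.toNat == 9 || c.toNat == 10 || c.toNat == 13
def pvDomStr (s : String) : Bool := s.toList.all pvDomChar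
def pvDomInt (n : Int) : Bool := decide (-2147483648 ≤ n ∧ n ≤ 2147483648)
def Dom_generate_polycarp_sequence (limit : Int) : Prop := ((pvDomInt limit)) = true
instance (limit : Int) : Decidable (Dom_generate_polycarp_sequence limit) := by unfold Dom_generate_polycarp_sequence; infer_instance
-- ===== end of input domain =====

-- B replaces A's scan-and-test while loop by a closed-form map over indices using the 18 valid
-- offsets of the period-30 pattern (objective: faster by a constant factor).

-- ===== PORT A =====
-- the while loop of A, state = (sequence, num); the fuel argument only makes the
-- structural recursion total — pvLoopA_eq below shows the fuel given is never exhausted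
def pvLoopA : Nat → Int → List Int → Int → List Int
  | 0, _, seq, _ => seq
  | fuel + 1, limit, seq, num =>
    if (seq.length : Int) < limit then
      if PySem.Int.mod num 3 ≠ 0 ∧ PySem.Int.mod num 10 ≠ 3 then
        pvLoopA fuel limit (seq ++ [num]) (num + 1)
      else
        pvLoopA fuel limit seq (num + 1)
    else seq

def generate_polycarp_sequence (limit : Int) : List Int :=
  pvLoopA (3 * limit.toNat + 3) limit [] 1

-- ===== PORT B =====
def pvOFFS : List Int := [1, 2, 4, 5, 7, 8, 10, 11, 14, 16, 17, 19, 20, 22, 25, 26, 28, 29]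

def generate_polycarp_sequence_alt (limit : Int) : List Int :=
  (PySem.List.pyRange 0 limit 1).map (fun i =>
    30 * PySem.Int.floordiv i 18 + PySem.List.pyGetD pvOFFS (PySem.Int.mod i 18) 0)

-- ===== PRECONDITION & SPEC =====
def Spec_generate_polycarp_sequence (limit : Int) (out : List Int) : Prop := out = generate_polycarp_sequence_alt limit
instance (limit : Int) (out : List Int) : Decidable (Spec_generate_polycarp_sequence limit out) := by unfold Spec_generate_polycarp_sequence; infer_instance

-- ===== CLAIM (what is proved, stated in full; the proofs are below) =====
def Claim_equal_generate_polycarp_sequence : Prop := ∀ (limit : Int), Dom_generate_polycarp_sequence limit → Spec_generate_polycarp_sequence limit (generate_polycarp_sequence limit)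

-- ===== LEMMAS AND PROOFS =====

-- pad: how many consecutive numbers starting at num fail the test (0, 1 or 2);
-- used as the fuel-sufficiency measure of the while loop.
def pvPad (num : Int) : Nat :=
  if num % 3 ≠ 0 ∧ num % 10 ≠ 3 then 0
  else if (num + 1) % 3 ≠ 0 ∧ (num + 1) % 10 ≠ 3 then 1 else 2

-- Python's % by a positive literal is Lean's emod
theorem pvMod_emod (num : Int) :
    (PySem.Int.mod num 3 ≠ 0 ∧ PySem.Int.mod num 10 ≠ 3) ↔ (num % 3 ≠ 0 ∧ num % 10 ≠ 3) := by
  rw [PySem.Int.mod_eq_emod_of_pos (b := 3) (by omega),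
      PySem.Int.mod_eq_emod_of_pos (b := 10) (by omega)]

-- among any three consecutive integers one passes the test (termination of the while loop)
theorem pvPad_lt (num : Int) (h : ¬(num % 3 ≠ 0 ∧ num % 10 ≠ 3)) : pvPad (num + 1) < pvPad num := by
  simp only [pvPad]
  split_ifs with h1 h2 <;> omega

-- pvPad is at most 2
theorem pvPad_le2 (num : Int) : pvPad num ≤ 2 := by
  simp only [pvPad]; split_ifs <;> omega


-- spec list: the first n integers ≥ num passing the test
def pvF : Nat → Int → List Int
  | 0, _ => []
  | n + 1, num =>
    if num % 3 ≠ 0 ∧ num % 10 ≠ 3 then num :: pvF n (num + 1)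
    else pvF (n + 1) (num + 1)
termination_by n num => (n + 1, pvPad num)
decreasing_by
  · exact Prod.Lex.left _ _ (Nat.lt_succ_self _)
  · exact Prod.Lex.right _ (pvPad_lt num (by assumption))

theorem pvF_zero (num : Int) : pvF 0 num = [] := by
  rw [pvF]

theorem pvF_good (n : Nat) (num : Int) (h : num % 3 ≠ 0 ∧ num % 10 ≠ 3) :
    pvF (n + 1) num = num :: pvF n (num + 1) := by
  rw [pvF, if_pos h]

theorem pvF_bad (n : Nat) (num : Int) (h : ¬(num % 3 ≠ 0 ∧ num % 10 ≠ 3)) :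
    pvF n num = pvF n (num + 1) := by
  cases n with
  | zero => rw [pvF_zero, pvF_zero]
  | succ m => rw [pvF, if_neg h]

-- with enough fuel, the while loop appends exactly the next (limit - len) passing integers
theorem pvLoopA_eq (fuel : Nat) : ∀ (limit : Int) (seq : List Int) (num : Int),
    3 * (limit.toNat - seq.length) + pvPad num ≤ fuel →
    pvLoopA fuel limit seq num = seq ++ pvF (limit.toNat - seq.length) num := by
  induction fuel with
  | zero =>
    intro limit seq num h
    have h0 : limit.toNat - seq.length = 0 := by omega
    rw [h0, pvF_zero]
    simp [pvLoopA]
  | succ f ih =>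
    intro limit seq num h
    by_cases hlt : (seq.length : Int) < limit
    · by_cases hg : num % 3 ≠ 0 ∧ num % 10 ≠ 3
      · rw [show pvLoopA (f + 1) limit seq num = pvLoopA f limit (seq ++ [num]) (num + 1) by
          rw [pvLoopA, if_pos hlt, if_pos ((pvMod_emod num).mpr hg)]]
        have hp := pvPad_le2 (num + 1)
        rw [ih limit (seq ++ [num]) (num + 1) (by
          simp only [List.length_append, List.length_cons, List.length_nil]; omega)]
        have h1 : limit.toNat - seq.length = (limit.toNat - (seq ++ [num]).length) + 1 := by
          simp only [List.length_append, List.length_cons, List.length_nil]; omega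
        rw [h1, pvF_good _ _ hg]
        simp
      · rw [show pvLoopA (f + 1) limit seq num = pvLoopA f limit seq (num + 1) by
          rw [pvLoopA, if_pos hlt, if_neg (fun hm => hg ((pvMod_emod num).mp hm))]]
        have hp := pvPad_lt num hg
        rw [ih limit seq (num + 1) (by omega), ← pvF_bad _ _ hg]
    · rw [pvLoopA, if_neg hlt]
      have h0 : limit.toNat - seq.length = 0 := by omega
      rw [h0, pvF_zero]
      simp

-- closed-form k-th element (Nat-index version of B's formula)
def pvG (k : Nat) : Int := 30 * (k / 18 : Nat) + pvOFFS.getD (k % 18) 0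

-- every pvG k passes the test
theorem pvG_good (k : Nat) : pvG k % 3 ≠ 0 ∧ pvG k % 10 ≠ 3 := by
  have hr : k % 18 = 0 ∨ k % 18 = 1 ∨ k % 18 = 2 ∨ k % 18 = 3 ∨ k % 18 = 4 ∨ k % 18 = 5 ∨ k % 18 = 6 ∨ k % 18 = 7 ∨ k % 18 = 8 ∨ k % 18 = 9 ∨ k % 18 = 10 ∨ k % 18 = 11 ∨ k % 18 = 12 ∨ k % 18 = 13 ∨ k % 18 = 14 ∨ k % 18 = 15 ∨ k % 18 = 16 ∨ k % 18 = 17 := by omega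
  unfold pvG pvOFFS
  rcases hr with h | h | h | h | h | h | h | h | h | h | h | h | h | h | h | h | h | h <;> rw [h] <;> simp only [List.getD_cons_zero, List.getD_cons_succ] <;>
    omega

-- every integer strictly between pvG k and pvG (k+1) fails the test, so pvF skips over them
theorem pvF_skip (m k : Nat) : pvF m (pvG k + 1) = pvF m (pvG (k + 1)) := by
  have hr : k % 18 = 0 ∨ k % 18 = 1 ∨ k % 18 = 2 ∨ k % 18 = 3 ∨ k % 18 = 4 ∨ k % 18 = 5 ∨ k % 18 = 6 ∨ k % 18 = 7 ∨ k % 18 = 8 ∨ k % 18 = 9 ∨ k % 18 = 10 ∨ k % 18 = 11 ∨ k % 18 = 12 ∨ k % 18 = 13 ∨ k % 18 = 14 ∨ k % 18 = 15 ∨ k % 18 = 16 ∨ k % 18 = 17 := by omega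
  rcases hr with h | h | h | h | h | h | h | h | h | h | h | h | h | h | h | h | h | h
  · -- k % 18 = 0
    have hq : (k + 1) / 18 = k / 18  := by omega
    have hrr : (k + 1) % 18 = 1 := by omega
    simp only [pvG, h, hq, hrr, pvOFFS, List.getD_cons_zero, List.getD_cons_succ]
    rw [show (30 * ((k / 18 : Nat) : Int) + 1 + 1 : Int) = 30 * ((k / 18 : Nat) : Int) + 2 by ring]
  · -- k % 18 = 1
    have hq : (k + 1) / 18 = k / 18  := by omega
    have hrr : (k + 1) % 18 = 2 := by omega
    simp only [pvG, h, hq, hrr, pvOFFS, List.getD_cons_zero, List.getD_cons_succ]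
    rw [show (30 * ((k / 18 : Nat) : Int) + 2 + 1 : Int) = 30 * ((k / 18 : Nat) : Int) + 3 by ring]
    rw [pvF_bad m (30 * ((k / 18 : Nat) : Int) + 3) (by omega)]
    rw [show (30 * ((k / 18 : Nat) : Int) + 3 + 1 : Int) = 30 * ((k / 18 : Nat) : Int) + 4 by ring]
  · -- k % 18 = 2
    have hq : (k + 1) / 18 = k / 18  := by omega
    have hrr : (k + 1) % 18 = 3 := by omega
    simp only [pvG, h, hq, hrr, pvOFFS, List.getD_cons_zero, List.getD_cons_succ]
    rw [show (30 * ((k / 18 : Nat) : Int) + 4 + 1 : Int) = 30 * ((k / 18 : Nat) : Int) + 5 by ring]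
  · -- k % 18 = 3
    have hq : (k + 1) / 18 = k / 18  := by omega
    have hrr : (k + 1) % 18 = 4 := by omega
    simp only [pvG, h, hq, hrr, pvOFFS, List.getD_cons_zero, List.getD_cons_succ]
    rw [show (30 * ((k / 18 : Nat) : Int) + 5 + 1 : Int) = 30 * ((k / 18 : Nat) : Int) + 6 by ring]
    rw [pvF_bad m (30 * ((k / 18 : Nat) : Int) + 6) (by omega)]
    rw [show (30 * ((k / 18 : Nat) : Int) + 6 + 1 : Int) = 30 * ((k / 18 : Nat) : Int) + 7 by ring]
  · -- k % 18 = 4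
    have hq : (k + 1) / 18 = k / 18  := by omega
    have hrr : (k + 1) % 18 = 5 := by omega
    simp only [pvG, h, hq, hrr, pvOFFS, List.getD_cons_zero, List.getD_cons_succ]
    rw [show (30 * ((k / 18 : Nat) : Int) + 7 + 1 : Int) = 30 * ((k / 18 : Nat) : Int) + 8 by ring]
  · -- k % 18 = 5
    have hq : (k + 1) / 18 = k / 18  := by omega
    have hrr : (k + 1) % 18 = 6 := by omega
    simp only [pvG, h, hq, hrr, pvOFFS, List.getD_cons_zero, List.getD_cons_succ]
    rw [show (30 * ((k / 18 : Nat) : Int) + 8 + 1 : Int) = 30 * ((k / 18 : Nat) : Int) + 9 by ring]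
    rw [pvF_bad m (30 * ((k / 18 : Nat) : Int) + 9) (by omega)]
    rw [show (30 * ((k / 18 : Nat) : Int) + 9 + 1 : Int) = 30 * ((k / 18 : Nat) : Int) + 10 by ring]
  · -- k % 18 = 6
    have hq : (k + 1) / 18 = k / 18  := by omega
    have hrr : (k + 1) % 18 = 7 := by omega
    simp only [pvG, h, hq, hrr, pvOFFS, List.getD_cons_zero, List.getD_cons_succ]
    rw [show (30 * ((k / 18 : Nat) : Int) + 10 + 1 : Int) = 30 * ((k / 18 : Nat) : Int) + 11 by ring]
  · -- k % 18 = 7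
    have hq : (k + 1) / 18 = k / 18  := by omega
    have hrr : (k + 1) % 18 = 8 := by omega
    simp only [pvG, h, hq, hrr, pvOFFS, List.getD_cons_zero, List.getD_cons_succ]
    rw [show (30 * ((k / 18 : Nat) : Int) + 11 + 1 : Int) = 30 * ((k / 18 : Nat) : Int) + 12 by ring]
    rw [pvF_bad m (30 * ((k / 18 : Nat) : Int) + 12) (by omega)]
    rw [show (30 * ((k / 18 : Nat) : Int) + 12 + 1 : Int) = 30 * ((k / 18 : Nat) : Int) + 13 by ring]
    rw [pvF_bad m (30 * ((k / 18 : Nat) : Int) + 13) (by omega)]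
    rw [show (30 * ((k / 18 : Nat) : Int) + 13 + 1 : Int) = 30 * ((k / 18 : Nat) : Int) + 14 by ring]
  · -- k % 18 = 8
    have hq : (k + 1) / 18 = k / 18  := by omega
    have hrr : (k + 1) % 18 = 9 := by omega
    simp only [pvG, h, hq, hrr, pvOFFS, List.getD_cons_zero, List.getD_cons_succ]
    rw [show (30 * ((k / 18 : Nat) : Int) + 14 + 1 : Int) = 30 * ((k / 18 : Nat) : Int) + 15 by ring]
    rw [pvF_bad m (30 * ((k / 18 : Nat) : Int) + 15) (by omega)]
    rw [show (30 * ((k / 18 : Nat) : Int) + 15 + 1 : Int) = 30 * ((k / 18 : Nat) : Int) + 16 by ring]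
  · -- k % 18 = 9
    have hq : (k + 1) / 18 = k / 18  := by omega
    have hrr : (k + 1) % 18 = 10 := by omega
    simp only [pvG, h, hq, hrr, pvOFFS, List.getD_cons_zero, List.getD_cons_succ]
    rw [show (30 * ((k / 18 : Nat) : Int) + 16 + 1 : Int) = 30 * ((k / 18 : Nat) : Int) + 17 by ring]
  · -- k % 18 = 10
    have hq : (k + 1) / 18 = k / 18  := by omega
    have hrr : (k + 1) % 18 = 11 := by omega
    simp only [pvG, h, hq, hrr, pvOFFS, List.getD_cons_zero, List.getD_cons_succ]
    rw [show (30 * ((k / 18 : Nat) : Int) + 17 + 1 : Int) = 30 * ((k / 18 : Nat) : Int) + 18 by ring]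
    rw [pvF_bad m (30 * ((k / 18 : Nat) : Int) + 18) (by omega)]
    rw [show (30 * ((k / 18 : Nat) : Int) + 18 + 1 : Int) = 30 * ((k / 18 : Nat) : Int) + 19 by ring]
  · -- k % 18 = 11
    have hq : (k + 1) / 18 = k / 18  := by omega
    have hrr : (k + 1) % 18 = 12 := by omega
    simp only [pvG, h, hq, hrr, pvOFFS, List.getD_cons_zero, List.getD_cons_succ]
    rw [show (30 * ((k / 18 : Nat) : Int) + 19 + 1 : Int) = 30 * ((k / 18 : Nat) : Int) + 20 by ring]
  · -- k % 18 = 12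
    have hq : (k + 1) / 18 = k / 18  := by omega
    have hrr : (k + 1) % 18 = 13 := by omega
    simp only [pvG, h, hq, hrr, pvOFFS, List.getD_cons_zero, List.getD_cons_succ]
    rw [show (30 * ((k / 18 : Nat) : Int) + 20 + 1 : Int) = 30 * ((k / 18 : Nat) : Int) + 21 by ring]
    rw [pvF_bad m (30 * ((k / 18 : Nat) : Int) + 21) (by omega)]
    rw [show (30 * ((k / 18 : Nat) : Int) + 21 + 1 : Int) = 30 * ((k / 18 : Nat) : Int) + 22 by ring]
  · -- k % 18 = 13
    have hq : (k + 1) / 18 = k / 18  := by omega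
    have hrr : (k + 1) % 18 = 14 := by omega
    simp only [pvG, h, hq, hrr, pvOFFS, List.getD_cons_zero, List.getD_cons_succ]
    rw [show (30 * ((k / 18 : Nat) : Int) + 22 + 1 : Int) = 30 * ((k / 18 : Nat) : Int) + 23 by ring]
    rw [pvF_bad m (30 * ((k / 18 : Nat) : Int) + 23) (by omega)]
    rw [show (30 * ((k / 18 : Nat) : Int) + 23 + 1 : Int) = 30 * ((k / 18 : Nat) : Int) + 24 by ring]
    rw [pvF_bad m (30 * ((k / 18 : Nat) : Int) + 24) (by omega)]
    rw [show (30 * ((k / 18 : Nat) : Int) + 24 + 1 : Int) = 30 * ((k / 18 : Nat) : Int) + 25 by ring]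
  · -- k % 18 = 14
    have hq : (k + 1) / 18 = k / 18  := by omega
    have hrr : (k + 1) % 18 = 15 := by omega
    simp only [pvG, h, hq, hrr, pvOFFS, List.getD_cons_zero, List.getD_cons_succ]
    rw [show (30 * ((k / 18 : Nat) : Int) + 25 + 1 : Int) = 30 * ((k / 18 : Nat) : Int) + 26 by ring]
  · -- k % 18 = 15
    have hq : (k + 1) / 18 = k / 18  := by omega
    have hrr : (k + 1) % 18 = 16 := by omega
    simp only [pvG, h, hq, hrr, pvOFFS, List.getD_cons_zero, List.getD_cons_succ]
    rw [show (30 * ((k / 18 : Nat) : Int) + 26 + 1 : Int) = 30 * ((k / 18 : Nat) : Int) + 27 by ring]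
    rw [pvF_bad m (30 * ((k / 18 : Nat) : Int) + 27) (by omega)]
    rw [show (30 * ((k / 18 : Nat) : Int) + 27 + 1 : Int) = 30 * ((k / 18 : Nat) : Int) + 28 by ring]
  · -- k % 18 = 16
    have hq : (k + 1) / 18 = k / 18  := by omega
    have hrr : (k + 1) % 18 = 17 := by omega
    simp only [pvG, h, hq, hrr, pvOFFS, List.getD_cons_zero, List.getD_cons_succ]
    rw [show (30 * ((k / 18 : Nat) : Int) + 28 + 1 : Int) = 30 * ((k / 18 : Nat) : Int) + 29 by ring]
  · -- k % 18 = 17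
    have hq : (k + 1) / 18 = k / 18 + 1 := by omega
    have hrr : (k + 1) % 18 = 0 := by omega
    simp only [pvG, h, hq, hrr, pvOFFS, List.getD_cons_zero, List.getD_cons_succ]
    rw [show (30 * ((k / 18 : Nat) : Int) + 29 + 1 : Int) = 30 * ((k / 18 : Nat) : Int) + 30 by ring]
    rw [pvF_bad m (30 * ((k / 18 : Nat) : Int) + 30) (by omega)]
    rw [show (30 * ((k / 18 : Nat) : Int) + 30 + 1 : Int) = 30 * (((k / 18 : Nat) : Int) + 1) + 1 by ring]
    push_cast
    ring_nf

theorem pvF_main (n : Nat) : ∀ k : Nat, pvF n (pvG k) = (List.range n).map (fun i => pvG (k + i)) := by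
  induction n with
  | zero => intro k; simp [pvF_zero]
  | succ m ih =>
    intro k
    rw [pvF_good m (pvG k) (pvG_good k), pvF_skip m k, ih (k + 1),
        List.range_succ_eq_map]
    simp [Function.comp_def, Nat.add_comm, Nat.add_left_comm]

theorem pvAlt_eq (limit : Int) :
    generate_polycarp_sequence_alt limit = (List.range limit.toNat).map pvG := by
  unfold generate_polycarp_sequence_alt
  rw [PySem.List.pyRange_one 0 limit, List.map_map]
  simp only [Int.sub_zero]
  apply List.map_congr_left
  intro k hk
  simp only [Function.comp_apply, zero_add]
  have hd : PySem.Int.floordiv (k : Int) 18 = ((k / 18 : Nat) : Int) := by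
    rw [PySem.Int.floordiv_eq_ediv_of_pos (by omega)]; omega
  have hm : PySem.Int.mod (k : Int) 18 = ((k % 18 : Nat) : Int) := by
    rw [PySem.Int.mod_eq_emod_of_pos (by omega)]; omega
  rw [hd, hm, PySem.List.pyGetD_natCast]
  simp [pvG]

theorem generate_polycarp_sequence_eq (limit : Int) :
    generate_polycarp_sequence limit = generate_polycarp_sequence_alt limit := by
  unfold generate_polycarp_sequence
  have hp := pvPad_le2 1
  rw [pvLoopA_eq (3 * limit.toNat + 3) limit [] 1 (by simp only [List.length_nil]; omega),
      pvAlt_eq]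
  have h1 : (1 : Int) = pvG 0 := by decide
  simp only [List.length_nil, Nat.sub_zero, List.nil_append, h1]
  rw [pvF_main limit.toNat 0]
  simp

-- ===== VERDICT (by name: the statement is the Claim_ definition above) =====
theorem generate_polycarp_sequence_spec : Claim_equal_generate_polycarp_sequence := by
  intro limit _
  unfold Spec_generate_polycarp_sequence
  exact generate_polycarp_sequence_eq limit
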